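-- pv_equiv track=rewrite | github.com/phuc-hyphen/Python_exercices | Graphe/euler215.py | possible_layers
-- ===== SOURCE A (Python) =====
-- def possible_layers(width):
--     configs = []
--
--     def rec(partial):
--         for brick in ('01', '001'):
--             wall = partial + brick
--             size = len(wall)
--             if size == width:
--                 configs.append(int(wall[:-1], 2))
--             elif size < width:
--                 rec(wall)
--
--     rec('')
--     return configs
-- ===== SOURCE B (Python) =====
-- def possible_layers(width):
--     configs = []
--     stack = [(0, 0)]
--     while stack:
--         length, mask = stack.pop()
--         for size in (3, 2):  # push size 3 first so size 2 is explored first (LIFO)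
--             new_len = length + size
--             if new_len == width:
--                 configs.append(mask)
--             elif new_len < width:
--                 stack.append((new_len, mask + (1 << (width - 1 - new_len))))
--     return configs
-- ===== Notes on version B (the rewrite author's own statement) =====
-- stated objective: alternative
-- what changed: Replaces A's string-building recursive DFS (concatenating '01'/'001' walls and parsing each finished wall in base two) by an iterative DFS over an explicit stack of (length, bitmask) states that sets breakpoint bits arithmetically, producing the same masks in the same order with no strings and no recursion; Pre_ excludes large widths on which A's per-brick DFS recursion depth exceeds CPython's recursion limit and A raises RecursionError.
import Mathlib
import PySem

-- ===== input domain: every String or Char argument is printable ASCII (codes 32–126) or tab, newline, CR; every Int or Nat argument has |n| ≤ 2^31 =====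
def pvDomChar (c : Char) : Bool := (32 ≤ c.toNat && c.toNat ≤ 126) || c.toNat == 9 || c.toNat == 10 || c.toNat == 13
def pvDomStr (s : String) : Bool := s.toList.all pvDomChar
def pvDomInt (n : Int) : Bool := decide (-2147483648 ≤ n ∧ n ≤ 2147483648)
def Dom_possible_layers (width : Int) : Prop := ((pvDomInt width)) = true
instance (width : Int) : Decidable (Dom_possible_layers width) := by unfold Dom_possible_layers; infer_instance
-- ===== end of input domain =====

-- B replaces A's string-building recursive DFS by an iterative explicit-stack DFS over (length, bitmask) states; same return value on Pre_.

-- ===== PORT A =====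
-- int(wall, 2) on a string of '0'/'1' characters only: exact hand port of base-2 parse
def pvParseBin (l : List Char) : Int :=
  l.foldl (fun a c => 2 * a + (if c = '1' then 1 else 0)) 0

-- rec(wl); Python strings of '0'/'1' are carried as List Char; fuel only makes
-- the recursion total (never reached: each call grows the wall, stops at width)
def pvRecA (fuel : Nat) (width : Int) (wl : List Char) : List Int :=
  match fuel with
  | 0 => []
  | Nat.succ fuel =>
    [['0','1'], ['0','0','1']].foldl (fun configs brick =>
      let wall := wl ++ brick
      let size : Int := (wall.length : Int)
      if size = width then configs ++ [pvParseBin wall.dropLast]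
      else if size < width then configs ++ pvRecA fuel width wall
      else configs) []

def possible_layers (width : Int) : List Int := pvRecA (width.toNat + 1) width []

-- ===== PORT B =====
-- the while loop; the Python stack's end (append/pop) is the list head here (same LIFO
-- discipline); fuel only makes the loop total (one unit per pop, never exhausted:
-- the stack measure proved below is below the initial fuel).  1 << k is 2 ^ k; the
-- shift count width-1-new_len is nonnegative since new_len < width in that branch.
def pvRecB (fuel : Nat) (width : Int) (stack : List (Int × Int)) (configs : List Int) : List Int :=
  match fuel with
  | 0 => configs
  | Nat.succ fuel =>
    match stack with
    | [] => configs
    | (length, mask) :: rest =>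
      match [(3 : Int), 2].foldl (fun (cs : List Int × List (Int × Int)) size =>
        let new_len := length + size
        if new_len = width then (cs.1 ++ [mask], cs.2)
        else if new_len < width then
          (cs.1, (new_len, mask + 2 ^ (width - 1 - new_len).toNat) :: cs.2)
        else cs) (configs, rest) with
      | (configs', stack') => pvRecB fuel width stack' configs'

def possible_layers_alt (width : Int) : List Int :=
  pvRecB (3 ^ (width.toNat + 1)) width [(0, 0)] []

-- ===== PRECONDITION & SPEC =====
-- Pre_ excludes large widths on which the Python A raises RecursionError: its DFS spends
-- one stack frame per laid brick (about half the width on its deepest branch), so beyond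
-- the bound that depth reaches CPython's default recursion limit; the bound keeps a margin
-- for the caller's own stack depth, below it A's first (deepest) branch still completes.
def Pre_possible_layers (width : Int) : Prop := width ≤ 1900
instance (width : Int) : Decidable (Pre_possible_layers width) := by unfold Pre_possible_layers; infer_instance
def pvWitness_possible_layers : Int := (12)

def Spec_possible_layers (width : Int) (out : List Int) : Prop := out = possible_layers_alt width
instance (width : Int) (out : List Int) : Decidable (Spec_possible_layers width out) := by unfold Spec_possible_layers; infer_instance

-- ===== CLAIM (what is proved, stated in full; the proofs are below) =====
def Claim_equal_possible_layers : Prop := ∀ (width : Int), Dom_possible_layers width → Pre_possible_layers width → Spec_possible_layers width (possible_layers width)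

-- ===== LEMMAS AND PROOFS =====

-- canonical mathematical form of the crack masks for a given (remaining) width
def Trec : Nat → List Int
  | 0 => []
  | 1 => []
  | 2 => [0]
  | 3 => [0]
  | (r + 4) => (Trec (r + 2)).map (fun m => 2 ^ (r + 1) + m) ++
               (Trec (r + 1)).map (fun m => 2 ^ r + m)

theorem parseBin_snoc (l : List Char) (c : Char) :
    pvParseBin (l ++ [c]) = 2 * pvParseBin l + (if c = '1' then 1 else 0) := by
  simp [pvParseBin, List.foldl_append]

theorem pvBit0 : (if ('0' : Char) = '1' then (1 : Int) else 0) = 0 := by decide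

theorem recA_eq (r : Nat) : ∀ (fuel : Nat) (width : Int) (wl : List Char),
    r ≤ fuel → width = (wl.length : Int) + r →
    pvRecA fuel width wl
      = (Trec r).map (fun m => pvParseBin wl * 2 ^ (r - 1) + m) := by
  induction r using Nat.strong_induction_on with
  | _ r ih =>
  intro fuel width wl hf hw
  match fuel with
  | 0 =>
    have : r = 0 := by omega
    subst this
    rfl
  | Nat.succ f =>
    simp only [pvRecA, List.foldl_cons, List.foldl_nil, List.length_append,
      List.length_cons, List.length_nil, List.nil_append]
    rcases r with _ | _ | _ | _ | r
    · rw [if_neg (by push_cast; omega), if_neg (by push_cast; omega),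
          if_neg (by push_cast; omega), if_neg (by push_cast; omega)]
      rfl
    · rw [if_neg (by push_cast; omega), if_neg (by push_cast; omega),
          if_neg (by push_cast; omega), if_neg (by push_cast; omega)]
      rfl
    · -- r = 2: brick 2 hits the width, brick 3 overshoots
      rw [if_neg (by push_cast; omega), if_neg (by push_cast; omega),
          if_pos (by push_cast; omega)]
      have h1 : wl ++ ['0', '1'] = (wl ++ ['0']) ++ ['1'] := by simp
      rw [h1, List.dropLast_concat, parseBin_snoc]
      show _ = [pvParseBin wl * 2 ^ 1 + 0]
      simp only [pvBit0]
      norm_num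
      ring
    · -- r = 3: brick 2 recurses (remaining 1, empty), brick 3 hits the width
      rw [if_pos (by push_cast; omega), if_neg (by push_cast; omega),
          if_pos (by push_cast; omega)]
      rw [ih 1 (by omega) f width (wl ++ ['0', '1']) (by omega)
            (by simp only [List.length_append, List.length_cons, List.length_nil];
                push_cast; omega)]
      have h3 : wl ++ ['0', '0', '1'] = ((wl ++ ['0']) ++ ['0']) ++ ['1'] := by simp
      rw [h3, List.dropLast_concat, parseBin_snoc, parseBin_snoc]
      show _ = [pvParseBin wl * 2 ^ 2 + 0]
      simp only [pvBit0, Trec, List.map_nil, List.nil_append]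
      norm_num
      ring
    · -- r ≥ 4: both bricks recurse
      rw [if_neg (by push_cast; omega), if_pos (by push_cast; omega),
          if_neg (by push_cast; omega), if_pos (by push_cast; omega)]
      rw [ih (r + 2) (by omega) f width (wl ++ ['0', '1']) (by omega)
            (by simp only [List.length_append, List.length_cons, List.length_nil];
                push_cast; omega),
          ih (r + 1) (by omega) f width (wl ++ ['0', '0', '1']) (by omega)
            (by simp only [List.length_append, List.length_cons, List.length_nil];
                push_cast; omega)]
      have h1 : wl ++ ['0', '1'] = (wl ++ ['0']) ++ ['1'] := by simp
      have h3 : wl ++ ['0', '0', '1'] = ((wl ++ ['0']) ++ ['0']) ++ ['1'] := by simp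
      rw [h1, parseBin_snoc, parseBin_snoc, h3, parseBin_snoc, parseBin_snoc, parseBin_snoc]
      show _ = (Trec (r + 4)).map (fun m => pvParseBin wl * 2 ^ (r + 3) + m)
      rw [Trec, List.map_append, List.map_map, List.map_map]
      congr 1
      · apply List.map_congr_left
        intro m _
        simp only [Function.comp_apply, pvBit0, if_true]
        rw [show r + 2 - 1 = r + 1 from rfl]
        ring
      · apply List.map_congr_left
        intro m _
        simp only [Function.comp_apply, pvBit0, if_true]
        rw [show r + 1 - 1 = r from rfl]
        ring

-- emissions of one stack node, and the stack measure that bounds the loop's iterations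
def nodeEmit (width : Int) (n : Int × Int) : List Int :=
  (Trec (width - n.1).toNat).map (fun t => n.2 + t)

def stackM (width : Int) (s : List (Int × Int)) : Nat :=
  (s.map (fun n => 3 ^ (width - n.1).toNat)).sum

theorem recB_eq (width : Int) : ∀ (fuel : Nat) (stack : List (Int × Int)) (configs : List Int),
    stackM width stack ≤ fuel →
    pvRecB fuel width stack configs
      = configs ++ (stack.map (nodeEmit width)).flatten := by
  intro fuel
  induction fuel with
  | zero =>
    intro stack configs hm
    match stack with
    | [] => simp [pvRecB]
    | n :: rest =>
      exfalso
      have h1 : 1 ≤ (3 : Nat) ^ (width - n.1).toNat := Nat.one_le_pow _ _ (by norm_num)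
      simp only [stackM, List.map_cons, List.sum_cons] at hm
      omega
  | succ fuel ih =>
    intro stack configs hm
    match stack with
    | [] => simp [pvRecB]
    | (l, m) :: rest =>
      simp only [stackM, List.map_cons, List.sum_cons] at hm
      simp only [pvRecB, List.foldl_cons, List.foldl_nil]
      by_cases h4 : 4 ≤ width - l
      · -- both bricks push
        rw [if_neg (show ¬(l + 2 = width) by omega), if_pos (show l + 2 < width by omega),
            if_neg (show ¬(l + 3 = width) by omega), if_pos (show l + 3 < width by omega)]
        show pvRecB fuel width
            ((l + 2, m + 2 ^ (width - 1 - (l + 2)).toNat) ::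
             (l + 3, m + 2 ^ (width - 1 - (l + 3)).toNat) :: rest) configs = _
        obtain ⟨j, hj⟩ : ∃ j, (width - l).toNat = j + 4 := ⟨(width - l).toNat - 4, by omega⟩
        have hx : 1 ≤ (3 : Nat) ^ j := Nat.one_le_pow _ _ (by norm_num)
        rw [ih _ configs (by
          simp only [stackM, List.map_cons, List.sum_cons]
          rw [show (width - (l + 2)).toNat = j + 2 by omega,
              show (width - (l + 3)).toNat = j + 1 by omega]
          rw [hj] at hm
          have h2 : (3 : Nat) ^ (j + 2) = 9 * 3 ^ j := by ring
          have h3 : (3 : Nat) ^ (j + 1) = 3 * 3 ^ j := by ring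
          have hh : (3 : Nat) ^ (j + 4) = 81 * 3 ^ j := by ring
          rw [h2, h3]
          rw [hh] at hm
          omega)]
        simp only [List.map_cons, List.flatten_cons, ← List.append_assoc]
        congr 1
        rw [List.append_assoc]
        congr 1
        -- node (l,m) emissions = emissions of the two pushed children, child 2 first
        have e1 : (width - 1 - (l + 2)).toNat = j + 1 := by omega
        have e2 : (width - 1 - (l + 3)).toNat = j := by omega
        have e3 : (width - (l + 2)).toNat = j + 2 := by omega
        have e4 : (width - (l + 3)).toNat = j + 1 := by omega
        simp only [nodeEmit, hj, e1, e2, e3, e4, Trec, List.map_append, List.map_map]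
        congr 1
        · apply List.map_congr_left
          intro t _
          simp only [Function.comp_apply]
          ring
        · apply List.map_congr_left
          intro t _
          simp only [Function.comp_apply]
          ring
      · by_cases h3 : width - l = 3
        · -- brick 3 completes, brick 2 pushes a dead node of remaining width 1
          rw [if_neg (show ¬(l + 2 = width) by omega), if_pos (show l + 2 < width by omega),
              if_pos (show l + 3 = width by omega)]
          show pvRecB fuel width
              ((l + 2, m + 2 ^ (width - 1 - (l + 2)).toNat) :: rest) (configs ++ [m]) = _
          have e0 : (width - l).toNat = 3 := by omega
          have e1 : (width - (l + 2)).toNat = 1 := by omega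
          rw [ih _ (configs ++ [m]) (by
            simp only [stackM, List.map_cons, List.sum_cons]
            rw [e1]
            rw [e0] at hm
            norm_num at hm ⊢
            omega)]
          simp [nodeEmit, e0, e1, Trec]
        · by_cases h2 : width - l = 2
          · -- brick 3 overshoots, brick 2 completes
            rw [if_pos (show l + 2 = width by omega), if_neg (show ¬(l + 3 = width) by omega),
                if_neg (show ¬(l + 3 < width) by omega)]
            show pvRecB fuel width rest (configs ++ [m]) = _
            have e0 : (width - l).toNat = 2 := by omega
            rw [ih _ (configs ++ [m]) (by
              simp only [stackM]
              have h1 : 1 ≤ (3 : Nat) ^ (width - l).toNat := Nat.one_le_pow _ _ (by norm_num)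
              omega)]
            simp [nodeEmit, e0, Trec]
          · -- remaining width ≤ 1 (dead node): nothing emitted, nothing pushed
            rw [if_neg (show ¬(l + 2 = width) by omega), if_neg (show ¬(l + 2 < width) by omega),
                if_neg (show ¬(l + 3 = width) by omega), if_neg (show ¬(l + 3 < width) by omega)]
            show pvRecB fuel width rest configs = _
            rw [ih _ configs (by
              simp only [stackM]
              have h1 : 1 ≤ (3 : Nat) ^ (width - l).toNat := Nat.one_le_pow _ _ (by norm_num)
              omega)]
            have e0 : (width - l).toNat = 0 ∨ (width - l).toNat = 1 := by omega
            rcases e0 with e0 | e0 <;> simp [nodeEmit, e0, Trec]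

-- ===== VERDICT (by name: the statement is the Claim_ definition above) =====
theorem possible_layers_spec : Claim_equal_possible_layers := by
  intro width _ _
  unfold Spec_possible_layers possible_layers possible_layers_alt
  rw [recB_eq width _ [(0, 0)] [] (by
    simp only [stackM, List.map_cons, List.map_nil, List.sum_cons, List.sum_nil, Nat.add_zero]
    rw [show ((width : Int) - 0).toNat = width.toNat by omega]
    exact Nat.pow_le_pow_right (by norm_num) (Nat.le_succ _))]
  by_cases h0 : width < 0
  · have hz : width.toNat = 0 := by omega
    rw [hz]
    simp only [pvRecA, List.foldl_cons, List.foldl_nil,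
      List.length_cons, List.length_nil, List.nil_append]
    rw [if_neg (by push_cast; omega), if_neg (by push_cast; omega),
        if_neg (by push_cast; omega), if_neg (by push_cast; omega)]
    simp [nodeEmit, hz, Trec]
  · have hr : width = ((([] : List Char).length : Int)) + width.toNat := by
      simp; omega
    rw [recA_eq width.toNat (width.toNat + 1) width [] (by omega) hr]
    have hp : pvParseBin [] = 0 := rfl
    simp [nodeEmit, hp]
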